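-- pv_equiv track=rewrite | github.com/apoorvajavali/python-problems | maximalCommonality.py | maxCommonality
-- ===== SOURCE A (Python) =====
-- def maxCommonality(string):
--     maxlength = 0
--     for i in range(1,len(string)):
--         length = 0
--         s1, s2 = string[:i], string[i:]
--         common = set(s1) & set(s2)
--         for c in common:
--             length += min(s1.count(c), s2.count(c))
--         maxlength = max(length, maxlength)
--     return maxlength
-- ===== SOURCE B (Python) =====
-- def maxCommonality(string):
--     right = {}
--     for ch in string:
--         right[ch] = right.get(ch, 0) + 1
--     left = {}
--     best = 0
--     common = 0
--     for ch in string[:-1]: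
--         l = left.get(ch, 0)
--         r = right.get(ch, 0)
--         common += min(l + 1, r - 1) - min(l, r)
--         left[ch] = l + 1
--         right[ch] = r - 1
--         if common > best:
--             best = common
--     return best
-- ===== Notes on version B (the rewrite author's own statement) =====
-- stated objective: faster
-- what changed: Instead of rebuilding both halves' character sets and recounting every character at every split point, B builds one count dictionary and advances the split incrementally, updating left/right counts and the running sum of per-character minima in O(1) per step.
import Mathlib
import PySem

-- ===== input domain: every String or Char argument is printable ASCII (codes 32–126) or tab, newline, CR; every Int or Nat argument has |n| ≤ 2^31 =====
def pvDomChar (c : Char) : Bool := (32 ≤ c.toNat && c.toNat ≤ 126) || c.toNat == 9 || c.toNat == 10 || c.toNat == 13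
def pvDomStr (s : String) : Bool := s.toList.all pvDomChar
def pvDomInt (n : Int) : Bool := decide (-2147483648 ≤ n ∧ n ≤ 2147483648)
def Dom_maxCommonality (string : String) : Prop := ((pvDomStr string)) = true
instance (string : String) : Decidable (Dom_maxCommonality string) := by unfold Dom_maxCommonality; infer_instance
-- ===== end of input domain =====

-- B replaces A's per-split set-intersection-and-recount (quadratic) by one left-to-right sweep that
-- keeps left/right character counts and the running sum of per-character minima, updated in O(1) per step.

-- ===== PORT A =====
def maxCommonality (string : String) : Int :=
  let s := string.toList
  (PySem.List.pyRange 1 (s.length : Int) 1).foldl (fun maxlength i =>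
    let s1 := PySem.List.slice s none (some i)
    let s2 := PySem.List.slice s (some i) none
    let common := PySem.Set.inter (PySem.Set.ofList s1) (PySem.Set.ofList s2)
    let length := common.foldl (fun acc c =>
      acc + min ((PySem.List.count s1 c : Int)) ((PySem.List.count s2 c : Int))) 0
    max length maxlength) 0

-- ===== PORT B =====
/-- The body of B's single sweep: state is (left, right, common, best). -/
def pvStepB (st : PySem.Dict Char Int × PySem.Dict Char Int × Int × Int) (ch : Char) :
    PySem.Dict Char Int × PySem.Dict Char Int × Int × Int :=
  let l := st.1.getD ch 0
  let r := st.2.1.getD ch 0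
  let common := st.2.2.1 + (min (l + 1) (r - 1) - min l r)
  (st.1.insert ch (l + 1), st.2.1.insert ch (r - 1), common,
    if common > st.2.2.2 then common else st.2.2.2)

def maxCommonality_alt (string : String) : Int :=
  let s := string.toList
  let right := s.foldl (fun d ch => d.insert ch (d.getD ch 0 + 1))
    (PySem.Dict.empty : PySem.Dict Char Int)
  let st := (PySem.List.slice s none (some (-1))).foldl pvStepB (PySem.Dict.empty, right, 0, 0)
  st.2.2.2

-- ===== PRECONDITION & SPEC =====
def Spec_maxCommonality (string : String) (out : Int) : Prop := out = maxCommonality_alt string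
instance (string : String) (out : Int) : Decidable (Spec_maxCommonality string out) := by unfold Spec_maxCommonality; infer_instance

-- ===== CLAIM (what is proved, stated in full; the proofs are below) =====
def Claim_equal_maxCommonality : Prop := ∀ (string : String), Dom_maxCommonality string → Spec_maxCommonality string (maxCommonality string)

-- ===== LEMMAS AND PROOFS =====

/-- The common value both programs compute at split `k`: the sum over the distinct
characters of `s` of the min of the two halves' counts. -/
def pvG (s : List Char) (k : Nat) : Int :=
  ((PySem.Set.ofList s).map
    (fun c => min (((s.take k).count c : Int)) (((s.drop k).count c : Int)))).sum

/-- Running maximum of `pvG` over splits `1..k`. -/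
def pvBestF (s : List Char) : Nat → Int
  | 0 => 0
  | k+1 => max (pvG s (k+1)) (pvBestF s k)

/-- Left count dictionary after `k` steps of B's loop. -/
def pvLt (s : List Char) (k : Nat) : PySem.Dict Char Int :=
  (s.take k).foldl (fun d ch => d.insert ch (d.getD ch 0 + 1)) PySem.Dict.empty

/-- Right count dictionary after `k` steps of B's loop. -/
def pvRt (s : List Char) (k : Nat) : PySem.Dict Char Int :=
  (s.take k).foldl (fun d ch => d.insert ch (d.getD ch 0 - 1))
    (s.foldl (fun d ch => d.insert ch (d.getD ch 0 + 1)) PySem.Dict.empty)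

lemma pv_if_gt (x y : Int) : (if x > y then x else y) = max x y := by
  split_ifs with h <;> omega

lemma pv_getD_sub_one (l : List Char) (d : PySem.Dict Char Int) (v : Char) :
    (l.foldl (fun d x => d.insert x (d.getD x 0 - 1)) d).getD v 0
      = d.getD v 0 - l.count v := by
  induction l generalizing d with
  | nil => simp
  | cons a t ih =>
    simp only [List.foldl_cons, ih, PySem.Dict.getD_insert, List.count_cons]
    by_cases h : v = a
    · simp [h]; ring
    · have h' : ¬ a = v := fun he => h he.symm
      simp [h, h']

lemma pv_getD_lt (s : List Char) (k : Nat) (v : Char) :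
    (pvLt s k).getD v 0 = ((s.take k).count v : Int) := by
  simp [pvLt, PySem.Dict.getD_foldl_insert_add_one]

lemma pv_getD_rt (s : List Char) (k : Nat) (v : Char) :
    (pvRt s k).getD v 0 = ((s.drop k).count v : Int) := by
  have hcnt : s.count v = (s.take k).count v + (s.drop k).count v := by
    conv_lhs => rw [← List.take_append_drop k s]
    rw [List.count_append]
  simp [pvRt, pv_getD_sub_one, PySem.Dict.getD_foldl_insert_add_one, hcnt]

lemma pv_sum_update (l : List Char) (hnd : l.Nodup) (c₀ : Char) (h0 : c₀ ∈ l)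
    (f f' : Char → Int) (hf : ∀ c ∈ l, c ≠ c₀ → f' c = f c) :
    (l.map f').sum = (l.map f).sum + (f' c₀ - f c₀) := by
  induction l with
  | nil => cases h0
  | cons a t ih =>
    rcases List.mem_cons.mp h0 with h | h
    · subst h
      have : ∀ c ∈ t, f' c = f c := fun c hc =>
        hf c (List.mem_cons_of_mem _ hc) (fun hce => (List.nodup_cons.mp hnd).1 (hce ▸ hc))
      simp [List.map_congr_left this]
      ring
    · have ha : f' a = f a := hf a (List.mem_cons_self) (fun hae => by
        exact (List.nodup_cons.mp hnd).1 (hae ▸ h))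
      simp only [List.map_cons, List.sum_cons, ha,
        ih (List.nodup_cons.mp hnd).2 h (fun c hc hne => hf c (List.mem_cons_of_mem _ hc) hne)]
      ring

lemma pvG_zero (s : List Char) : pvG s 0 = 0 := by
  simp [pvG]

lemma pv_inner_eq (s : List Char) (k : Nat) :
    (PySem.Set.inter (PySem.Set.ofList (s.take k)) (PySem.Set.ofList (s.drop k))).foldl
      (fun acc c => acc + min (((s.take k).count c : Int)) (((s.drop k).count c : Int))) 0
      = pvG s k := by
  rw [PySem.List.foldl_add]
  simp only [zero_add, pvG]
  have hndI : (PySem.Set.inter (PySem.Set.ofList (s.take k)) (PySem.Set.ofList (s.drop k))).Nodup :=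
    (PySem.Set.nodup_ofList (s.take k)).filter _
  rw [← List.sum_toFinset _ hndI, ← List.sum_toFinset _ (PySem.Set.nodup_ofList s)]
  have hmemI : ∀ c, c ∈ PySem.Set.inter (PySem.Set.ofList (s.take k)) (PySem.Set.ofList (s.drop k))
      ↔ c ∈ s.take k ∧ c ∈ s.drop k := by
    intro c
    simp [PySem.Set.inter, List.mem_filter, PySem.Set.mem_ofList, PySem.Set.contains,
      ]
  apply Finset.sum_subset
  · intro c hc
    simp only [List.mem_toFinset] at hc ⊢
    rw [hmemI] at hc
    rw [PySem.Set.mem_ofList]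
    exact List.mem_of_mem_take hc.1
  · intro c hc hcn
    simp only [List.mem_toFinset] at hc hcn
    rw [hmemI] at hcn
    rcases not_and_or.mp hcn with h | h
    · rw [List.count_eq_zero_of_not_mem h]
      have : (0:Int) ≤ ((s.drop k).count c : Int) := Int.natCast_nonneg _
      omega
    · rw [List.count_eq_zero_of_not_mem h]
      have : (0:Int) ≤ ((s.take k).count c : Int) := Int.natCast_nonneg _
      omega

lemma pv_pyRange_one (n : Nat) :
    PySem.List.pyRange 1 (n : Int) 1 = List.map (fun k : Nat => 1 + (k : Int)) (List.range (n - 1)) := by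
  unfold PySem.List.pyRange
  by_cases h : (1:Int) < (n:Int)
  · simp only [if_neg one_ne_zero, if_pos zero_lt_one, if_pos h]
    have hc : (((n:Int) - 1 + 1 - 1) / 1).toNat = n - 1 := by
      rw [Int.ediv_one]; omega
    rw [hc]
    simp
  · simp only [if_neg one_ne_zero, if_pos zero_lt_one, if_neg h]
    have : n - 1 = 0 := by omega
    simp [this]

lemma pv_foldl_range (s : List Char) (m : Nat) :
    (List.range m).foldl (fun acc k => max (pvG s (k + 1)) acc) 0 = pvBestF s m := by
  induction m with
  | zero => rfl
  | succ m ih => rw [List.range_succ, List.foldl_append]; simp [pvBestF, ih]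

lemma pv_loop_inv (s : List Char) (u : List Char) :
    ∀ (k : Nat), s.dropLast = s.take k ++ u →
    u.foldl pvStepB (pvLt s k, pvRt s k, pvG s k, pvBestF s k)
    = (pvLt s (k + u.length), pvRt s (k + u.length), pvG s (k + u.length), pvBestF s (k + u.length)) := by
  induction u with
  | nil => intro k _; simp
  | cons ch u' ih =>
    intro k h
    have hlen := congrArg List.length h
    simp only [List.length_dropLast, List.length_append, List.length_take, List.length_cons] at hlen
    have hkl : k < s.length := by omega
    have hch : s[k]? = some ch := by
      have h1 : s.dropLast[k]? = some ch := by
        rw [h, List.getElem?_append_right (by simp only [List.length_take]; omega)]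
        simp only [List.length_take]
        have : k - min k s.length = 0 := by omega
        rw [this]
        rfl
      rw [List.dropLast_eq_take, List.getElem?_take] at h1
      by_cases hk2 : k < s.length - 1
      · rwa [if_pos hk2] at h1
      · rw [if_neg hk2] at h1; cases h1
    have hget : s[k] = ch := by
      have h2 := List.getElem?_eq_getElem hkl
      rw [hch] at h2
      exact (Option.some.injEq _ _).mp h2.symm
    have htake : s.take (k + 1) = s.take k ++ [ch] := by
      rw [List.take_add_one, hch]; rfl
    have hdrop : s.drop k = ch :: s.drop (k + 1) := by
      rw [List.drop_eq_getElem_cons hkl, hget]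
    have hcr : (s.drop k).count ch = (s.drop (k + 1)).count ch + 1 := by
      rw [hdrop, List.count_cons_self]
    have hLt : pvLt s (k + 1) = (pvLt s k).insert ch ((pvLt s k).getD ch 0 + 1) := by
      unfold pvLt; rw [htake, List.foldl_append]; rfl
    have hRt : pvRt s (k + 1) = (pvRt s k).insert ch ((pvRt s k).getD ch 0 - 1) := by
      unfold pvRt; rw [htake, List.foldl_append]; rfl
    have hmem : ch ∈ PySem.Set.ofList s :=
      (PySem.Set.mem_ofList s ch).mpr (hget ▸ List.getElem_mem hkl)
    have hG : pvG s (k + 1) = pvG s k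
        + (min (((s.take k).count ch : Int) + 1) (((s.drop k).count ch : Int) - 1)
           - min ((s.take k).count ch : Int) ((s.drop k).count ch : Int)) := by
      unfold pvG
      have hf : ∀ c ∈ PySem.Set.ofList s, c ≠ ch →
          min (((s.take (k + 1)).count c : Int)) (((s.drop (k + 1)).count c : Int))
            = min (((s.take k).count c : Int)) (((s.drop k).count c : Int)) := by
        intro c _ hne
        conv_rhs => rw [hdrop]
        rw [htake, List.count_append]
        simp [Ne.symm hne]
      rw [pv_sum_update (PySem.Set.ofList s) (PySem.Set.nodup_ofList s) ch hmem
        (fun c => min (((s.take k).count c : Int)) (((s.drop k).count c : Int)))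
        (fun c => min (((s.take (k + 1)).count c : Int)) (((s.drop (k + 1)).count c : Int)))
        hf]
      congr 1
      rw [htake, List.count_append, List.count_singleton', hcr]
      push_cast
      simp
    have hG' : pvG s (k + 1) = pvG s k
        + (min ((pvLt s k).getD ch 0 + 1) ((pvRt s k).getD ch 0 - 1)
           - min ((pvLt s k).getD ch 0) ((pvRt s k).getD ch 0)) := by
      rw [pv_getD_lt, pv_getD_rt]; exact hG
    have hstep : pvStepB (pvLt s k, pvRt s k, pvG s k, pvBestF s k) ch
        = (pvLt s (k + 1), pvRt s (k + 1), pvG s (k + 1), pvBestF s (k + 1)) := by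
      simp only [pvStepB, pvBestF]
      rw [hLt, hRt, hG', pv_if_gt]
    rw [List.foldl_cons, hstep]
    have h' : s.dropLast = s.take (k + 1) ++ u' := by
      rw [h, htake, List.append_assoc]; rfl
    have hlen' : k + (u'.length + 1) = (k + 1) + u'.length := by omega
    simp only [List.length_cons, hlen']
    exact ih (k + 1) h'

lemma pv_slice_neg_one (xs : List Char) : PySem.List.slice xs none (some (-1)) = xs.dropLast := by
  simp [PySem.List.slice]
  exact List.dropLast_eq_take.symm

lemma pv_main (s : List Char) :
    (PySem.List.pyRange 1 (s.length : Int) 1).foldl (fun maxlength i =>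
      let s1 := PySem.List.slice s none (some i)
      let s2 := PySem.List.slice s (some i) none
      let common := PySem.Set.inter (PySem.Set.ofList s1) (PySem.Set.ofList s2)
      let length := common.foldl (fun acc c =>
        acc + min ((PySem.List.count s1 c : Int)) ((PySem.List.count s2 c : Int))) 0
      max length maxlength) 0
    = ((PySem.List.slice s none (some (-1))).foldl pvStepB
        (PySem.Dict.empty,
         s.foldl (fun d ch => d.insert ch (d.getD ch 0 + 1)) (PySem.Dict.empty : PySem.Dict Char Int),
         0, 0)).2.2.2 := by
  rw [pv_slice_neg_one]
  have hinit : ((PySem.Dict.empty : PySem.Dict Char Int),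
      s.foldl (fun d ch => d.insert ch (d.getD ch 0 + 1)) (PySem.Dict.empty : PySem.Dict Char Int),
      (0:Int), (0:Int)) = (pvLt s 0, pvRt s 0, pvG s 0, pvBestF s 0) := by
    rw [pvG_zero]; rfl
  rw [hinit, pv_loop_inv s s.dropLast 0 (by simp)]
  simp only [List.length_dropLast, Nat.zero_add]
  rw [pv_pyRange_one, List.foldl_map]
  rw [PySem.List.foldl_congr_mem _ _ (fun acc k => max (pvG s (k + 1)) acc) 0 ?hcong]
  · exact pv_foldl_range s (s.length - 1)
  case hcong =>
    intro acc k _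
    simp only []
    have hnn : (0:Int) ≤ 1 + (k:Int) := by omega
    have ht : ((1:Int) + (k:Int)).toNat = k + 1 := by omega
    rw [PySem.List.slice_to s hnn, PySem.List.slice_from s hnn, ht]
    simp only [PySem.List.count_eq]
    rw [pv_inner_eq]

-- ===== VERDICT (by name: the statement is the Claim_ definition above) =====
theorem maxCommonality_spec : Claim_equal_maxCommonality := by
  intro string _
  unfold Spec_maxCommonality maxCommonality maxCommonality_alt
  exact pv_main string.toList
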